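-- pv_equiv track=rewrite | github.com/inyogeshwar/YTMusicLabBot | main.py | is_youtube_url
-- ===== SOURCE A (Python) =====
-- def is_youtube_url(text: str) -> bool:
--     """Check if text contains a YouTube URL"""
--     youtube_patterns = [
--         'youtube.com/watch',
--         'youtu.be/',
--         'youtube.com/v/',
--         'youtube.com/embed/',
--         'm.youtube.com/watch'
--     ]
--     text_lower = text.lower()
--     return any(pattern in text_lower for pattern in youtube_patterns)
-- ===== SOURCE B (Python) =====
-- def is_youtube_url(text: str) -> bool:
--     """Check if text contains a YouTube URL (single scan; 'm.youtube.com/watch'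
--     is dropped as redundant: it already contains 'youtube.com/watch')."""
--     prefixes = ('youtube.com/watch', 'youtu.be/', 'youtube.com/v/', 'youtube.com/embed/')
--     t = text.lower()
--     for i in range(len(t)):
--         if t.startswith(prefixes, i):
--             return True
--     return False
-- ===== Notes on version B (the rewrite author's own statement) =====
-- stated objective: alternative
-- what changed: Instead of testing each of five patterns with a separate substring search over the text, B makes a single left-to-right scan over the lowered text checking at each position whether one of four anchored prefixes starts there; the fifth, mobile-URL pattern is dropped as redundant because it contains one of the remaining patterns as a substring (redundancy proved in Lean).
import Mathlib
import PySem

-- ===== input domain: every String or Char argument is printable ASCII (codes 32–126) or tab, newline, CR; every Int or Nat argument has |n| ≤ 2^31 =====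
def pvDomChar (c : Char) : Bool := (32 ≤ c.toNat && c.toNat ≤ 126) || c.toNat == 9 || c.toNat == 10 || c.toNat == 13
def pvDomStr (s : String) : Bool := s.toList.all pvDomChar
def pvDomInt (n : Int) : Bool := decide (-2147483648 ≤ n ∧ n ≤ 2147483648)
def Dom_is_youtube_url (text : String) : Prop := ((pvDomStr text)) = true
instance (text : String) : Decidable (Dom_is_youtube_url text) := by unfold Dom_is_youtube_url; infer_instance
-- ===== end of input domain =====

-- B replaces five whole-text substring searches by one left-to-right scan with four
-- anchored prefixes, dropping the redundant mobile-URL pattern (alternative, not faster).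


-- ===== PORT A =====
def is_youtube_url (text : String) : Bool :=
  let youtube_patterns : List String :=
    ["youtube.com/watch", "youtu.be/", "youtube.com/v/", "youtube.com/embed/",
     "m.youtube.com/watch"]
  let text_lower := PySem.Str.lower text
  youtube_patterns.any (fun pattern => PySem.Str.isIn pattern text_lower)

-- ===== PORT B =====
-- B's anchored test: does one of the four prefixes start at the head of s?
def pvHit (s : List Char) : Bool :=
  "youtube.com/watch".toList.isPrefixOf s || "youtu.be/".toList.isPrefixOf s ||
  "youtube.com/v/".toList.isPrefixOf s || "youtube.com/embed/".toList.isPrefixOf s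

-- the scan: 'for i in range(len(t)): if t.startswith(prefixes, i): return True'
def pvScan : List Char → Bool
  | [] => false
  | c :: rest => pvHit (c :: rest) || pvScan rest

def is_youtube_url_alt (text : String) : Bool :=
  pvScan (PySem.Chars.lower text.toList)

-- ===== PRECONDITION & SPEC =====
def Spec_is_youtube_url (text : String) (out : Bool) : Prop := out = is_youtube_url_alt text
instance (text : String) (out : Bool) : Decidable (Spec_is_youtube_url text out) := by unfold Spec_is_youtube_url; infer_instance

-- ===== CLAIM (what is proved, stated in full; the proofs are below) =====
def Claim_equal_is_youtube_url : Prop := ∀ (text : String), Dom_is_youtube_url text → Spec_is_youtube_url text (is_youtube_url text)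

-- ===== LEMMAS AND PROOFS =====

-- the scan succeeds iff the anchored test succeeds at some drop point
theorem pvScan_iff (s : List Char) : pvScan s = true ↔ ∃ j, pvHit (s.drop j) = true := by
  induction s with
  | nil =>
    simp only [pvScan]
    constructor
    · intro h; exact absurd h (by simp)
    · rintro ⟨j, hj⟩; simpa [pvHit] using hj
  | cons c rest ih =>
    simp only [pvScan, Bool.or_eq_true, ih]
    constructor
    · rintro (h | ⟨j, hj⟩)
      · exact ⟨0, h⟩
      · exact ⟨j + 1, by simpa using hj⟩
    · rintro ⟨j, hj⟩
      cases j with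
      | zero => exact Or.inl (by simpa using hj)
      | succ j => exact Or.inr ⟨j, by simpa using hj⟩

-- the anchored-scan form of each pattern equals its substring search
theorem pvScan_eq_isIn (s : List Char) :
    pvScan s = (PySem.Chars.isIn "youtube.com/watch".toList s ||
      PySem.Chars.isIn "youtu.be/".toList s ||
      PySem.Chars.isIn "youtube.com/v/".toList s ||
      PySem.Chars.isIn "youtube.com/embed/".toList s) := by
  by_cases h : pvScan s = true
  · rw [h]
    obtain ⟨j, hj⟩ := (pvScan_iff s).mp h
    simp only [pvHit, Bool.or_eq_true, List.isPrefixOf_iff_prefix] at hj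
    symm
    simp only [Bool.or_eq_true]
    rcases hj with ((h1 | h2) | h3) | h4
    · exact Or.inl <| Or.inl <| Or.inl <|
        (PySem.Chars.exists_prefix_drop_iff_isIn _ _).mp ⟨j, h1⟩
    · exact Or.inl <| Or.inl <| Or.inr <|
        (PySem.Chars.exists_prefix_drop_iff_isIn _ _).mp ⟨j, h2⟩
    · exact Or.inl <| Or.inr <|
        (PySem.Chars.exists_prefix_drop_iff_isIn _ _).mp ⟨j, h3⟩
    · exact Or.inr <| (PySem.Chars.exists_prefix_drop_iff_isIn _ _).mp ⟨j, h4⟩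
  · rw [Bool.eq_false_iff.mpr h]
    symm
    rw [Bool.eq_false_iff]
    intro hc
    apply h
    rw [pvScan_iff]
    simp only [Bool.or_eq_true] at hc
    rcases hc with ((h1 | h2) | h3) | h4
    · obtain ⟨j, hj⟩ := (PySem.Chars.exists_prefix_drop_iff_isIn _ _).mpr h1
      refine ⟨j, ?_⟩
      simp only [pvHit, Bool.or_eq_true, List.isPrefixOf_iff_prefix]
      exact Or.inl (Or.inl (Or.inl hj))
    · obtain ⟨j, hj⟩ := (PySem.Chars.exists_prefix_drop_iff_isIn _ _).mpr h2
      refine ⟨j, ?_⟩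
      simp only [pvHit, Bool.or_eq_true, List.isPrefixOf_iff_prefix]
      exact Or.inl (Or.inl (Or.inr hj))
    · obtain ⟨j, hj⟩ := (PySem.Chars.exists_prefix_drop_iff_isIn _ _).mpr h3
      refine ⟨j, ?_⟩
      simp only [pvHit, Bool.or_eq_true, List.isPrefixOf_iff_prefix]
      exact Or.inl (Or.inr hj)
    · obtain ⟨j, hj⟩ := (PySem.Chars.exists_prefix_drop_iff_isIn _ _).mpr h4
      refine ⟨j, ?_⟩
      simp only [pvHit, Bool.or_eq_true, List.isPrefixOf_iff_prefix]
      exact Or.inr hj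

-- the fifth pattern is redundant: it contains 'youtube.com/watch'
theorem pvFifth_redundant (s : List Char) :
    PySem.Chars.isIn "m.youtube.com/watch".toList s = true →
    PySem.Chars.isIn "youtube.com/watch".toList s = true := by
  intro h
  rw [PySem.Chars.isIn_iff_infix] at h ⊢
  exact List.IsInfix.trans (by decide) h

theorem is_youtube_url_spec : Claim_equal_is_youtube_url := by
  intro text _
  unfold Spec_is_youtube_url is_youtube_url is_youtube_url_alt
  simp only [List.any_cons, List.any_nil, Bool.or_false, PySem.Str.isIn,
    PySem.Str.toList_lower]
  rw [pvScan_eq_isIn]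
  by_cases h5 : PySem.Chars.isIn "m.youtube.com/watch".toList
      (PySem.Chars.lower text.toList) = true
  · rw [h5, pvFifth_redundant _ h5]; simp
  · rw [Bool.eq_false_iff.mpr h5]
    cases h1 : PySem.Chars.isIn "youtube.com/watch".toList (PySem.Chars.lower text.toList) <;>
    cases h2 : PySem.Chars.isIn "youtu.be/".toList (PySem.Chars.lower text.toList) <;>
    cases h3 : PySem.Chars.isIn "youtube.com/v/".toList (PySem.Chars.lower text.toList) <;>
    cases h4 : PySem.Chars.isIn "youtube.com/embed/".toList (PySem.Chars.lower text.toList) <;>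
    rfl
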